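-- pv_equiv track=rewrite | github.com/MorningYin/MoA_Jittor | Models/Tokenizer.py | _split_whitespaces_or_nonwhitespaces
-- ===== SOURCE A (Python) =====
-- from typing import (
--     AbstractSet,
--     cast,
--     Collection,
--     Dict,
--     Iterator,
--     List,
--     Literal,
--     Sequence,
--     TypedDict,
--     Union,
-- )
--
-- def _split_whitespaces_or_nonwhitespaces(
--     s: str, max_consecutive_slice_len: int
-- ) -> Iterator[str]:
--     """
--     分割字符串，确保每个子字符串包含不超过指定长度的连续空白字符或非空白字符
--
--     这是一个辅助方法，用于处理超长文本，避免Tiktoken的字符限制问题。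
--
--     Args:
--         s (str): 要分割的字符串
--         max_consecutive_slice_len (int): 最大连续字符长度
--
--     Yields:
--         Iterator[str]: 分割后的子字符串迭代器
--
--     Note:
--         - 该方法确保每个子字符串要么全是空白字符，要么全是非空白字符
--         - 当连续字符超过限制时，会在适当位置分割
--         - 这种分割方式保持了文本的语义完整性
--     """
--     # ==================== 初始化变量 ====================
--     current_slice_len = 0  # 当前连续字符长度
--     current_slice_is_space = s[0].isspace() if len(s) > 0 else False  # 当前字符类型（空白/非空白）
--     slice_start = 0  # 当前子字符串的起始位置
--
--     # ==================== 遍历字符串进行分割 ====================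
--     for i in range(len(s)):
--         is_now_space = s[i].isspace()  # 当前字符是否为空白
--
--         # ==================== 字符类型变化检测 ====================
--         # 使用异或操作检测字符类型是否发生变化
--         if current_slice_is_space ^ is_now_space:
--             # 字符类型发生变化，重置计数器
--             current_slice_len = 1
--             current_slice_is_space = is_now_space
--         else:
--             # 字符类型相同，增加计数器
--             current_slice_len += 1
--             # ==================== 长度限制检查 ====================
--             if current_slice_len > max_consecutive_slice_len:
--                 # 超过长度限制，输出当前子字符串并重新开始
--                 yield s[slice_start:i]
--                 slice_start = i
--                 current_slice_len = 1
--
--     # ==================== 输出最后一个子字符串 ====================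
--     yield s[slice_start:]
-- ===== SOURCE B (Python) =====
-- def _split_whitespaces_or_nonwhitespaces(s, max_consecutive_slice_len):
--     m = max_consecutive_slice_len
--     n = len(s)
--     # run-length encode s into (start, length) of maximal same-type runs
--     runs = []
--     i = 0
--     while i < n:
--         j = i + 1
--         while j < n and s[j].isspace() == s[i].isspace():
--             j += 1
--         runs.append((i, j - i))
--         i = j
--     # global cut positions: every m characters inside each run
--     cuts = [c for (p, L) in runs for c in range(p + m, p + L, m)]
--     prev = 0
--     for c in cuts:
--         yield s[prev:c]
--         prev = c
--     yield s[prev:]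
-- ===== Notes on version B (the rewrite author's own statement) =====
-- stated objective: alternative
-- what changed: B replaces A's single stateful scan (running counter + slice_start) by run-length encoding the string, computing all global cut positions up front (every m characters inside each maximal same-type run) and slicing between consecutive cuts; Pre_ excludes non-positive max_consecutive_slice_len, where A's output (a leading empty piece then every character separately) is an artefact of its counter reset and B's range step is zero or negative.
-- outside the precondition, e.g. on _split_whitespaces_or_nonwhitespaces('ab', 0): A returns ['', 'a', 'b'], B raises ValueError; on _split_whitespaces_or_nonwhitespaces('ab', -1): A returns ['', 'a', 'b'], B returns ['ab']
import Mathlib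
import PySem

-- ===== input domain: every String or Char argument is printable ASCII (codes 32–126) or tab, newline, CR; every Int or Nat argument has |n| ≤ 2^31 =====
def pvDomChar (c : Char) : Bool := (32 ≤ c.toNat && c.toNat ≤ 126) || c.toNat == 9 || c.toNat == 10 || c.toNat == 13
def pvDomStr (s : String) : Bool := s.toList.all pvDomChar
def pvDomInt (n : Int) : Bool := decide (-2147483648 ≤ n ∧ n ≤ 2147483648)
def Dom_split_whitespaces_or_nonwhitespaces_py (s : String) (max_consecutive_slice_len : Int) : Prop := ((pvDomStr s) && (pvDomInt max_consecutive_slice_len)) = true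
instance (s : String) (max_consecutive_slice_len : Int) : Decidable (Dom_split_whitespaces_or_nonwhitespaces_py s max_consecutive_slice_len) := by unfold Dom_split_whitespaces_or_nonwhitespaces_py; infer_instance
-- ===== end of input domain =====

-- B precomputes all cut positions from a run-length encoding of the string instead of
-- scanning with a running counter; same pieces for positive max length (objective: alternative).

-- ===== PORT A =====
-- s[i].isspace() for an index i (indices in both ports are always in range)
def pvT (cs : List Char) (i : Int) : Bool := PySem.Chars.isspace (PySem.List.pyGetD cs i ' ')

-- loop body of A: state is (current_slice_len, current_slice_is_space, slice_start, yielded pieces)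
def pvStepA (cs : List Char) (m : Int) (st : Int × Bool × Int × List String) (i : Int) :
    Int × Bool × Int × List String :=
  let is_now_space := pvT cs i
  if st.2.1 ^^ is_now_space then (1, is_now_space, st.2.2.1, st.2.2.2)
  else if st.1 + 1 > m then
    (1, st.2.1, i, st.2.2.2 ++ [String.ofList (PySem.List.slice cs (some st.2.2.1) (some i))])
  else (st.1 + 1, st.2.1, st.2.2.1, st.2.2.2)

def split_whitespaces_or_nonwhitespaces_py (s : String) (max_consecutive_slice_len : Int) : List String :=
  let cs := s.toList
  let init : Int × Bool × Int × List String :=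
    (0, if 0 < cs.length then pvT cs 0 else false, 0, [])
  let st := (PySem.List.pyRange 0 cs.length 1).foldl (pvStepA cs max_consecutive_slice_len) init
  st.2.2.2 ++ [String.ofList (PySem.List.slice cs (some st.2.2.1) none)]

-- ===== PORT B =====
-- inner while loop of B's run scan: length of the maximal prefix of l whose isspace equals t
def pvRunLen (l : List Char) (t : Bool) : Nat :=
  match l with
  | [] => 0
  | c :: rest => if PySem.Chars.isspace c == t then pvRunLen rest t + 1 else 0

-- outer while loop of B's run scan: maximal same-type runs of l as (global start, length), l = cs.drop p
def pvRuns (l : List Char) (p : Nat) : List (Nat × Nat) :=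
  match l with
  | [] => []
  | c :: rest =>
    let r := pvRunLen rest (PySem.Chars.isspace c)
    (p, 1 + r) :: pvRuns (rest.drop r) (p + (1 + r))
termination_by l.length
decreasing_by simp only [List.length_cons, List.length_drop]; omega

-- B's cut-position list: range(p+m, p+L, m) inside each run (p, L)
def pvCutsB (cs : List Char) (m : Int) : List Int :=
  (pvRuns cs 0).flatMap (fun r => PySem.List.pyRange ((r.1 : Int) + m) ((r.1 : Int) + (r.2 : Int)) m)

-- B's final loop: yield s[prev:c] for each cut c, carrying prev
def pvPieceStep (cs : List Char) (st : List String × Int) (c : Int) : List String × Int :=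
  (st.1 ++ [String.ofList (PySem.List.slice cs (some st.2) (some c))], c)

def split_whitespaces_or_nonwhitespaces_py_alt (s : String) (max_consecutive_slice_len : Int) : List String :=
  let cs := s.toList
  let st := (pvCutsB cs max_consecutive_slice_len).foldl (pvPieceStep cs) ([], 0)
  st.1 ++ [String.ofList (PySem.List.slice cs (some st.2) none)]

-- ===== PRECONDITION & SPEC =====
-- Pre_ excludes non-positive max_consecutive_slice_len, on which A still returns: there A's
-- value (a leading empty piece, then every character as its own piece) is an artefact of its
-- counter reset, while B's range step is zero (ValueError) or negative (no cuts at all).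
def Pre_split_whitespaces_or_nonwhitespaces_py (s : String) (max_consecutive_slice_len : Int) : Prop :=
  1 ≤ max_consecutive_slice_len
instance (s : String) (max_consecutive_slice_len : Int) : Decidable (Pre_split_whitespaces_or_nonwhitespaces_py s max_consecutive_slice_len) := by unfold Pre_split_whitespaces_or_nonwhitespaces_py; infer_instance

def pvWitness_split_whitespaces_or_nonwhitespaces_py : String × Int := ("ab cd", 2)

def Spec_split_whitespaces_or_nonwhitespaces_py (s : String) (max_consecutive_slice_len : Int) (out : List String) : Prop := out = split_whitespaces_or_nonwhitespaces_py_alt s max_consecutive_slice_len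
instance (s : String) (max_consecutive_slice_len : Int) (out : List String) : Decidable (Spec_split_whitespaces_or_nonwhitespaces_py s max_consecutive_slice_len out) := by unfold Spec_split_whitespaces_or_nonwhitespaces_py; infer_instance

-- ===== CLAIM (what is proved, stated in full; the proofs are below) =====
def Claim_equal_split_whitespaces_or_nonwhitespaces_py : Prop := ∀ (s : String) (max_consecutive_slice_len : Int), Dom_split_whitespaces_or_nonwhitespaces_py s max_consecutive_slice_len → Pre_split_whitespaces_or_nonwhitespaces_py s max_consecutive_slice_len → Spec_split_whitespaces_or_nonwhitespaces_py s max_consecutive_slice_len (split_whitespaces_or_nonwhitespaces_py s max_consecutive_slice_len)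

-- ===== LEMMAS AND PROOFS =====

-- pyRange with a positive step: nil and cons forms
theorem pvRange_pos_nil {a b s : Int} (hs : 0 < s) (h : b ≤ a) :
    PySem.List.pyRange a b s = [] := by
  rw [PySem.List.pyRange_of_pos _ _ hs, if_neg (by omega)]
  simp

theorem pvRange_pos_cons {a b s : Int} (hs : 0 < s) (hab : a < b) :
    PySem.List.pyRange a b s = a :: PySem.List.pyRange (a + s) b s := by
  rw [PySem.List.pyRange_of_pos _ _ hs, PySem.List.pyRange_of_pos _ _ hs, if_pos hab]
  have hdiv : (b - a + s - 1) / s = (b - a - 1) / s + 1 := by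
    have h1 := Int.add_mul_ediv_right (b - a - 1) 1 (ne_of_gt hs)
    have h2 : b - a + s - 1 = b - a - 1 + 1 * s := by ring
    rw [h2, h1]
  have hq0 : 0 ≤ (b - a - 1) / s := Int.ediv_nonneg (by omega) (le_of_lt hs)
  have hN : ((b - a + s - 1) / s).toNat = ((b - a - 1) / s).toNat + 1 := by
    rw [hdiv]; omega
  rw [hN, List.range_succ_eq_map]
  by_cases h2 : a + s < b
  · rw [if_pos h2]
    have he : (b - (a + s) + s - 1) / s = (b - a - 1) / s := by ring_nf
    rw [he]
    simp only [List.map_cons, List.map_map]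
    refine List.cons_eq_cons.mpr ⟨by push_cast; ring, ?_⟩
    apply List.map_congr_left
    intro k _
    simp only [Function.comp_apply]
    push_cast
    ring
  · rw [if_neg h2]
    have hz : (b - a - 1) / s = 0 := Int.ediv_eq_zero_of_lt (by omega) (by omega)
    rw [hz]
    simp

-- facts about pvRunLen
theorem pvRunLen_le (l : List Char) (t : Bool) : pvRunLen l t ≤ l.length := by
  induction l with
  | nil => simp [pvRunLen]
  | cons c rest ih =>
    by_cases hc : PySem.Chars.isspace c = t <;> simp [pvRunLen, hc] <;> omega

theorem pvRunLen_mem (l : List Char) (t : Bool) :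
    ∀ j < pvRunLen l t, PySem.Chars.isspace (l.getD j ' ') = t := by
  induction l with
  | nil => simp [pvRunLen]
  | cons c rest ih =>
    intro j hj
    by_cases hc : PySem.Chars.isspace c = t
    · cases j with
      | zero => simpa using hc
      | succ j' =>
        simp only [pvRunLen, hc, beq_self_eq_true, if_true] at hj
        simpa using ih j' (by omega)
    · simp [pvRunLen, hc] at hj

theorem pvRunLen_stop (l : List Char) (t : Bool) (h : pvRunLen l t < l.length) :
    PySem.Chars.isspace (l.getD (pvRunLen l t) ' ') ≠ t := by
  induction l with
  | nil => simp at h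
  | cons c rest ih =>
    by_cases hc : PySem.Chars.isspace c = t
    · simp only [pvRunLen, hc, beq_self_eq_true, if_true] at h ⊢
      simpa [List.getD_cons_succ] using ih (by simpa using h)
    · simpa [pvRunLen, hc] using hc

-- m ≥ 1: inside a run of equal-type characters the counter cuts every m positions
theorem pvL1 (cs : List Char) (m : Int) (hm : 1 ≤ m) :
    ∀ (k a : Nat) (ℓ : Int) (t : Bool) (start : Int) (acc : List String),
    1 ≤ ℓ → ℓ ≤ m →
    (∀ j : Nat, a ≤ j → j < a + k → pvT cs (j : Int) = t) →
    ∃ ℓ',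
      (PySem.List.pyRange (a : Int) ((a : Int) + (k : Int)) 1).foldl (pvStepA cs m) (ℓ, t, start, acc) =
      (ℓ', t,
       ((PySem.List.pyRange ((a : Int) + (m - ℓ)) ((a : Int) + (k : Int)) m).foldl
          (pvPieceStep cs) (acc, start)).2,
       ((PySem.List.pyRange ((a : Int) + (m - ℓ)) ((a : Int) + (k : Int)) m).foldl
          (pvPieceStep cs) (acc, start)).1) := by
  intro k
  induction k with
  | zero =>
    intro a ℓ t start acc h1 h2 _
    rw [show ((a : Int) + (0 : Nat) : Int) = (a : Int) by push_cast; ring,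
        PySem.List.pyRange_one_eq_nil (le_refl _),
        pvRange_pos_nil (by omega) (by omega)]
    exact ⟨ℓ, rfl⟩
  | succ k ih =>
    intro a ℓ t start acc h1 h2 hty
    have hcons : PySem.List.pyRange (a : Int) ((a : Int) + ((k+1 : Nat) : Int)) 1 =
        (a : Int) :: PySem.List.pyRange ((a : Int) + 1) ((a : Int) + ((k+1 : Nat) : Int)) 1 :=
      PySem.List.pyRange_one_cons (by push_cast; omega)
    have hshift : ((a : Int)) + ((k+1 : Nat) : Int) = (((a+1 : Nat)) : Int) + ((k : Nat) : Int) := by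
      push_cast; ring
    have hsucc : ((a : Int) + 1) = (((a+1 : Nat)) : Int) := by push_cast; ring
    have hta : pvT cs ((a : Nat) : Int) = t := hty a (le_refl _) (by omega)
    have hty' : ∀ j : Nat, a + 1 ≤ j → j < (a + 1) + k → pvT cs (j : Int) = t := by
      intro j hj1 hj2; exact hty j (by omega) (by omega)
    rw [hcons]
    simp only [List.foldl_cons]
    have hxor : (t ^^ pvT cs ((a : Nat) : Int)) = false := by rw [hta, Bool.xor_self]
    by_cases hcut : ℓ = m
    · -- counter full: A cuts at a, and a is the next cut position of B
      have hstep : pvStepA cs m (ℓ, t, start, acc) ((a : Nat) : Int) =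
          (1, t, ((a : Nat) : Int),
           acc ++ [String.ofList (PySem.List.slice cs (some start) (some ((a : Nat) : Int)))]) := by
        simp only [pvStepA, hxor, Bool.false_eq_true, if_false]
        rw [if_pos (by omega)]
      have hcuts : PySem.List.pyRange ((a : Int) + (m - ℓ)) ((a : Int) + ((k+1 : Nat) : Int)) m =
          ((a : Nat) : Int) :: PySem.List.pyRange (((a+1 : Nat) : Int) + (m - 1))
            ((a : Int) + ((k+1 : Nat) : Int)) m := by
        rw [show ((a : Int) + (m - ℓ)) = (a : Int) by omega,
            pvRange_pos_cons (by omega) (by push_cast; omega)]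
        congr 2
        push_cast; ring
      rw [hstep, hcuts]
      simp only [List.foldl_cons, pvPieceStep]
      rw [hshift, hsucc]
      exact ih (a + 1) 1 t ((a : Nat) : Int)
        (acc ++ [String.ofList (PySem.List.slice cs (some start) (some ((a : Nat) : Int)))])
        (by omega) hm hty'
    · -- counter not full: A just increments, B has no cut here
      have hstep : pvStepA cs m (ℓ, t, start, acc) ((a : Nat) : Int) =
          (ℓ + 1, t, start, acc) := by
        simp only [pvStepA, hxor, Bool.false_eq_true, if_false]
        rw [if_neg (by omega)]
      have hcuts : ((a : Int) + (m - ℓ)) = (((a+1 : Nat) : Int) + (m - (ℓ + 1))) := by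
        push_cast; ring
      rw [hstep, hcuts, hshift, hsucc]
      exact ih (a + 1) (ℓ + 1) t start acc (by omega) (by omega) hty'

-- reading a character through a drop: s[p+j] is (s.drop p)[j]
theorem pvT_drop (cs : List Char) (p j : Nat) :
    pvT cs ((p + j : Nat) : Int) = PySem.Chars.isspace ((cs.drop p).getD j ' ') := by
  simp only [pvT, PySem.List.pyGetD_natCast, List.getD_eq_getElem?_getD, List.getElem?_drop]

-- m ≥ 1: processing the remaining runs from a run start p
theorem pvL2 (cs : List Char) (m : Int) (hm : 1 ≤ m) :
    ∀ (d p : Nat) (ℓ₀ : Int) (t₀ : Bool) (start : Int) (acc : List String),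
    cs.length = p + d → p < cs.length →
    (t₀ ≠ pvT cs (p : Int) ∨ (t₀ = pvT cs (p : Int) ∧ ℓ₀ = 0)) →
    ∃ ℓ' t',
      (PySem.List.pyRange (p : Int) (cs.length : Int) 1).foldl (pvStepA cs m) (ℓ₀, t₀, start, acc) =
      (ℓ', t',
       (((pvRuns (cs.drop p) p).flatMap
           (fun r => PySem.List.pyRange (((r.1 : Nat) : Int) + m) (((r.1 : Nat) : Int) + ((r.2 : Nat) : Int)) m)).foldl
          (pvPieceStep cs) (acc, start)).2,
       (((pvRuns (cs.drop p) p).flatMap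
           (fun r => PySem.List.pyRange (((r.1 : Nat) : Int) + m) (((r.1 : Nat) : Int) + ((r.2 : Nat) : Int)) m)).foldl
          (pvPieceStep cs) (acc, start)).1) := by
  intro d
  induction d using Nat.strong_induction_on with
  | _ d ih =>
  intro p ℓ₀ t₀ start acc hlen hp hentry
  cases hdrop : cs.drop p with
  | nil =>
    exfalso
    have := congrArg List.length hdrop
    simp at this
    omega
  | cons c rest =>
  have hrest_len : rest.length + 1 = cs.length - p := by
    have := congrArg List.length hdrop
    simp at this
    omega
  have hRle : pvRunLen rest (PySem.Chars.isspace c) ≤ rest.length := pvRunLen_le _ _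
  set t := PySem.Chars.isspace c with ht
  set R := pvRunLen rest t with hR
  have hLle : p + (1 + R) ≤ cs.length := by omega
  have hF1 : pvT cs ((p : Nat) : Int) = t := by
    have h0 := pvT_drop cs p 0
    rw [hdrop] at h0
    simpa using h0
  have hF2 : ∀ j : Nat, p ≤ j → j < p + (1 + R) → pvT cs (j : Int) = t := by
    intro j hj1 hj2
    obtain ⟨i, rfl⟩ : ∃ i, j = p + i := ⟨j - p, by omega⟩
    have hpd := pvT_drop cs p i
    rw [hdrop] at hpd
    cases i with
    | zero => simpa using hpd
    | succ i' =>
      rw [hpd]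
      simp only [List.getD_cons_succ]
      exact pvRunLen_mem rest t i' (by omega)
  have hF4 : p + (1 + R) < cs.length → pvT cs ((p + (1 + R) : Nat) : Int) ≠ t := by
    intro hlt
    have hpd := pvT_drop cs p (1 + R)
    rw [hdrop] at hpd
    rw [hpd]
    simp only [show 1 + R = R + 1 by omega, List.getD_cons_succ]
    exact pvRunLen_stop rest t (by omega)
  have hF5 : cs.drop (p + (1 + R)) = rest.drop R := by
    have h1 : cs.drop (p + (1 + R)) = (cs.drop p).drop (1 + R) := by
      rw [List.drop_drop]
    rw [h1, hdrop, show 1 + R = R + 1 by omega, List.drop_succ_cons]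
  have hruns : pvRuns (c :: rest) p = (p, 1 + R) :: pvRuns (rest.drop R) (p + (1 + R)) := by
    rw [pvRuns]
  -- split the index range at the end of the first run
  have hsplit : PySem.List.pyRange (p : Int) (cs.length : Int) 1 =
      PySem.List.pyRange (p : Int) ((p + (1 + R) : Nat) : Int) 1 ++
      PySem.List.pyRange ((p + (1 + R) : Nat) : Int) (cs.length : Int) 1 :=
    PySem.List.pyRange_one_append _ _ _ (by push_cast; omega) (by push_cast; omega)
  have hcons1 : PySem.List.pyRange (p : Int) ((p + (1 + R) : Nat) : Int) 1 =
      ((p : Nat) : Int) :: PySem.List.pyRange ((p : Int) + 1) ((p + (1 + R) : Nat) : Int) 1 :=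
    PySem.List.pyRange_one_cons (by push_cast; omega)
  rw [hsplit, List.foldl_append, hcons1]
  simp only [List.foldl_cons]
  -- the first index of the run always leaves the state (1, run type, start, acc)
  have hstep : pvStepA cs m (ℓ₀, t₀, start, acc) ((p : Nat) : Int) = (1, t, start, acc) := by
    rcases hentry with hne | ⟨heq, hz⟩
    · have hx : (t₀ ^^ pvT cs ((p : Nat) : Int)) = true := by
        rw [hF1]
        rw [hF1] at hne
        revert hne
        cases t₀ <;> cases t <;> simp
      simp only [pvStepA, hx, if_true]
      rw [hF1]
    · have hx : (t₀ ^^ pvT cs ((p : Nat) : Int)) = false := by rw [heq, Bool.xor_self]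
      simp only [pvStepA, hx, Bool.false_eq_true, if_false]
      rw [hz, if_neg (by omega), heq, hF1]
      norm_num
  rw [hstep]
  -- the rest of the run via pvL1
  obtain ⟨ℓ'', hL1⟩ := pvL1 cs m hm R (p + 1) 1 t start acc (le_refl _) hm
    (fun j hj1 hj2 => hF2 j (by omega) (by omega))
  have hend : ((p + 1 : Nat) : Int) + ((R : Nat) : Int) = ((p + (1 + R) : Nat) : Int) := by
    push_cast; ring
  have hsucc : ((p : Int) + 1) = ((p + 1 : Nat) : Int) := by push_cast; ring
  rw [hend] at hL1
  rw [hsucc, hL1]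
  -- B's cuts inside this run coincide with pvL1's cut range
  have hcuts1 : PySem.List.pyRange (((p : Nat) : Int) + m) (((p : Nat) : Int) + ((1 + R : Nat) : Int)) m =
      PySem.List.pyRange (((p + 1 : Nat) : Int) + (m - 1)) ((p + (1 + R) : Nat) : Int) m := by
    congr 1 <;> push_cast <;> ring
  rw [hruns]
  simp only [List.flatMap_cons]
  rw [hcuts1, List.foldl_append]
  by_cases hend2 : p + (1 + R) = cs.length
  · -- the run ends the string
    have hnil1 : PySem.List.pyRange ((p + (1 + R) : Nat) : Int) (cs.length : Int) 1 = [] := by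
      rw [hend2]
      exact PySem.List.pyRange_one_eq_nil (le_refl _)
    have hnil2 : pvRuns (rest.drop R) (p + (1 + R)) = [] := by
      rw [← hF5, hend2, List.drop_length, pvRuns]
    rw [hnil1, hnil2]
    simp only [List.flatMap_nil, List.foldl_nil]
    exact ⟨ℓ'', t, rfl⟩
  · -- more runs follow: recurse at the next run start
    have hrec := ih (cs.length - (p + (1 + R))) (by omega) (p + (1 + R)) ℓ'' t
      ((List.foldl (pvPieceStep cs) (acc, start)
         (PySem.List.pyRange (((p + 1 : Nat) : Int) + (m - 1)) ((p + (1 + R) : Nat) : Int) m)).2)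
      ((List.foldl (pvPieceStep cs) (acc, start)
         (PySem.List.pyRange (((p + 1 : Nat) : Int) + (m - 1)) ((p + (1 + R) : Nat) : Int) m)).1)
      (by omega) (by omega) (Or.inl (Ne.symm (hF4 (by omega))))
    rw [hF5] at hrec
    exact hrec

theorem pv_main (cs : List Char) (m : Int) (hm : 1 ≤ m) :
    ∃ ℓ t,
      (PySem.List.pyRange 0 cs.length 1).foldl (pvStepA cs m)
        (0, (if 0 < cs.length then pvT cs 0 else false), 0, []) =
      (ℓ, t, ((pvCutsB cs m).foldl (pvPieceStep cs) ([], 0)).2,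
              ((pvCutsB cs m).foldl (pvPieceStep cs) ([], 0)).1) := by
  unfold pvCutsB
  by_cases hlen : 0 < cs.length
  · rw [if_pos hlen]
    have hrec := pvL2 cs m hm cs.length 0 0 (pvT cs 0) 0 [] (by omega) hlen
      (Or.inr ⟨rfl, rfl⟩)
    rw [List.drop_zero] at hrec
    simpa using hrec
  · have h0 : cs = [] := List.eq_nil_of_length_eq_zero (by omega)
    subst h0
    rw [if_neg hlen]
    simp only [List.length_nil, pvRuns]
    rw [show ((0 : Nat) : Int) = 0 by norm_num, PySem.List.pyRange_one_eq_nil (le_refl _)]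
    exact ⟨0, false, rfl⟩

-- ===== VERDICT (by name: the statement is the Claim_ definition above) =====
theorem split_whitespaces_or_nonwhitespaces_py_spec : Claim_equal_split_whitespaces_or_nonwhitespaces_py := by
  intro s m _ hm
  unfold Spec_split_whitespaces_or_nonwhitespaces_py
  unfold split_whitespaces_or_nonwhitespaces_py split_whitespaces_or_nonwhitespaces_py_alt
  obtain ⟨ℓ, t, h⟩ := pv_main s.toList m hm
  simp only at h ⊢
  rw [h]
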